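-- pv_equiv track=rewrite | github.com/charlescstpierr/mobius-cli | src/mobius/workflow/qa.py | _worst_verdict
-- ===== SOURCE A (Python) =====
-- from enum import StrEnum
-- from typing import Any
--
-- class Verdict(StrEnum):
--     """Ternary QA verdict with worst-wins ordering."""
--
--     PASS = "pass"
--     FAIL = "fail"
--     UNVERIFIED = "unverified"
--
-- def _worst_verdict(verdicts: Any) -> Verdict:
--     worst = Verdict.PASS
--     for verdict in verdicts:
--         if verdict == Verdict.FAIL:
--             return Verdict.FAIL
--         if verdict == Verdict.UNVERIFIED:
--             worst = Verdict.UNVERIFIED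
--     return worst
-- ===== SOURCE B (Python) =====
-- from enum import StrEnum
-- from typing import Any
--
-- class Verdict(StrEnum):
--     PASS = "pass"
--     FAIL = "fail"
--     UNVERIFIED = "unverified"
--
-- def _worst_verdict(verdicts: Any) -> Verdict:
--     vs = list(verdicts)
--     if Verdict.FAIL in vs:
--         return Verdict.FAIL
--     if Verdict.UNVERIFIED in vs:
--         return Verdict.UNVERIFIED
--     return Verdict.PASS
-- ===== Notes on version B (the rewrite author's own statement) =====
-- stated objective: idiomatic
-- what changed: Replaces the single early-exit accumulator loop with materializing the iterable into a list and doing two independent membership scans (FAIL first, then UNVERIFIED).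
import Mathlib
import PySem

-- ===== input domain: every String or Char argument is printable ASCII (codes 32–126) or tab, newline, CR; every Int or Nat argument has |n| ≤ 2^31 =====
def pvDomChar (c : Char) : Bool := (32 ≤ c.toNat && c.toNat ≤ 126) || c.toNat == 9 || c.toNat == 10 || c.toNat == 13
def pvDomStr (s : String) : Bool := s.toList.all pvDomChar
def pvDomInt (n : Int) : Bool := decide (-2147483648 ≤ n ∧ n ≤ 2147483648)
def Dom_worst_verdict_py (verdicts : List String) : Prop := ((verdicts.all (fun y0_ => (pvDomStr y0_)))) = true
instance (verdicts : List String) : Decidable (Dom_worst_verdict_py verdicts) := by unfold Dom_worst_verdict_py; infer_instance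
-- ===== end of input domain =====

-- B replaces A's single early-exit accumulator loop by two independent membership scans (idiomatic).

-- ===== PORT A =====
-- early-exit loop with accumulator `worst`, transliterated as structural recursion
def pvWorstLoop (verdicts : List String) (worst : String) : String :=
  match verdicts with
  | [] => worst
  | v :: rest =>
    if v = "fail" then "fail"
    else if v = "unverified" then pvWorstLoop rest "unverified"
    else pvWorstLoop rest worst

def worst_verdict_py (verdicts : List String) : String :=
  pvWorstLoop verdicts "pass"

-- ===== PORT B =====
def worst_verdict_py_alt (verdicts : List String) : String :=
  let vs := verdicts
  if vs.contains "fail" then "fail"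
  else if vs.contains "unverified" then "unverified"
  else "pass"

-- ===== PRECONDITION & SPEC =====
def Spec_worst_verdict_py (verdicts : List String) (out : String) : Prop := out = worst_verdict_py_alt verdicts
instance (verdicts : List String) (out : String) : Decidable (Spec_worst_verdict_py verdicts out) := by unfold Spec_worst_verdict_py; infer_instance

-- ===== CLAIM (what is proved, stated in full; the proofs are below) =====
def Claim_equal_worst_verdict_py : Prop := ∀ (verdicts : List String), Dom_worst_verdict_py verdicts → Spec_worst_verdict_py verdicts (worst_verdict_py verdicts)

-- ===== LEMMAS AND PROOFS =====
theorem pvWorstLoop_eq (vs : List String) (w : String) :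
    pvWorstLoop vs w =
      if vs.contains "fail" then "fail"
      else if vs.contains "unverified" then "unverified" else w := by
  induction vs generalizing w with
  | nil => simp [pvWorstLoop]
  | cons v rest ih =>
    by_cases hf : v = "fail" <;> by_cases hu : v = "unverified" <;>
      simp [pvWorstLoop, hf, hu, ih, List.contains_cons] <;> split_ifs <;> simp_all

-- ===== VERDICT (by name: the statement is the Claim_ definition above) =====
theorem worst_verdict_py_spec : Claim_equal_worst_verdict_py := by
  intro verdicts _
  unfold Spec_worst_verdict_py worst_verdict_py worst_verdict_py_alt
  rw [pvWorstLoop_eq]
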